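-- pv_equiv track=rewrite | github.com/Vishnudharan24/graavitons-sms | backend/api/exam.py | get_batch_mock_subjects
-- ===== SOURCE A (Python) =====
-- MOCK_SUBJECT_CONFIG = {
--     "maths": {"aliases": {"maths", "mathematics", "math"}, "unit_field": "mathsUnitNames"},
--     "physics": {"aliases": {"physics"}, "unit_field": "physicsUnitNames"},
--     "chemistry": {"aliases": {"chemistry"}, "unit_field": "chemistryUnitNames"},
--     "biology": {"aliases": {"biology"}, "unit_field": "biologyUnitNames"},
-- }
--
-- def get_batch_mock_subjects(batch_subjects):
--     if not batch_subjects: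
--         return ["maths", "physics", "chemistry", "biology"]
--
--     selected = []
--     lowered = {str(s).strip().lower() for s in batch_subjects if str(s).strip()}
--     for key in ["maths", "physics", "chemistry", "biology"]:
--         aliases = MOCK_SUBJECT_CONFIG[key]["aliases"]
--         if lowered.intersection(aliases):
--             selected.append(key)
--
--     return selected if selected else ["maths", "physics", "chemistry", "biology"]
-- ===== SOURCE B (Python) =====
-- MOCK_SUBJECT_CONFIG = {
--     "maths": {"aliases": {"maths", "mathematics", "math"}, "unit_field": "mathsUnitNames"},
--     "physics": {"aliases": {"physics"}, "unit_field": "physicsUnitNames"},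
--     "chemistry": {"aliases": {"chemistry"}, "unit_field": "chemistryUnitNames"},
--     "biology": {"aliases": {"biology"}, "unit_field": "biologyUnitNames"},
-- }
--
-- _DEFAULT_SUBJECTS = ["maths", "physics", "chemistry", "biology"]
--
-- _ALIAS_TO_KEY = {
--     alias: key
--     for key, cfg in MOCK_SUBJECT_CONFIG.items()
--     for alias in cfg["aliases"]
-- }
--
--
-- def get_batch_mock_subjects(batch_subjects):
--     matched = set()
--     for s in batch_subjects:
--         norm = str(s).strip().lower()
--         if not norm:
--             continue
--         key = _ALIAS_TO_KEY.get(norm)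
--         if key is not None:
--             matched.add(key)
--     result = [k for k in _DEFAULT_SUBJECTS if k in matched]
--     return result if result else list(_DEFAULT_SUBJECTS)
-- ===== Notes on version B (the rewrite author's own statement) =====
-- stated objective: idiomatic
-- what changed: B inverts the config once into an alias->canonical dict and makes a single pass over the inputs collecting matched canonical keys, instead of building a lowered set and intersecting it with each key's alias set.
import Mathlib
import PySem

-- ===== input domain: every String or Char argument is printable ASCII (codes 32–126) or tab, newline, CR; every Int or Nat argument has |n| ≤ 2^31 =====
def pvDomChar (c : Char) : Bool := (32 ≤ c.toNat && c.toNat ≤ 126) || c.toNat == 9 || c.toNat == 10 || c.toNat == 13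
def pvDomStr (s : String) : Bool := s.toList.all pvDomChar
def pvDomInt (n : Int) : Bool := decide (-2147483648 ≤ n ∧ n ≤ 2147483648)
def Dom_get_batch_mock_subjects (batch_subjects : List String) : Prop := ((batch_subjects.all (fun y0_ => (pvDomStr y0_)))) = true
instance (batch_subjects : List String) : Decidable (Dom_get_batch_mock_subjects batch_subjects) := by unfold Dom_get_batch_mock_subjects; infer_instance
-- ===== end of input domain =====

-- B inverts the config once into an alias->canonical dict and matches in a single pass
-- over the inputs, instead of intersecting a lowered input set with each key's alias set
-- (idiomatic restructuring; no speed claim).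

-- ===== PORT A =====
-- MOCK_SUBJECT_CONFIG restricted to the "aliases" field (the "unit_field" entries are never read here).
def pvMockAliases : PySem.Dict String (PySem.Set String) :=
  PySem.Dict.mk
    [("maths", PySem.Set.ofList ["maths", "mathematics", "math"]),
     ("physics", PySem.Set.ofList ["physics"]),
     ("chemistry", PySem.Set.ofList ["chemistry"]),
     ("biology", PySem.Set.ofList ["biology"])]

def get_batch_mock_subjects (batch_subjects : List String) : List String :=
  if batch_subjects = [] then ["maths", "physics", "chemistry", "biology"]
  else
    let lowered : PySem.Set String :=
      PySem.Set.ofList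
        ((batch_subjects.filter (fun s => decide (PySem.Str.strip s ≠ ""))).map
          (fun s => PySem.Str.lower (PySem.Str.strip s)))
    -- MOCK_SUBJECT_CONFIG[key] never raises: every looked-up key is present, so getD is exact here.
    let selected := ["maths", "physics", "chemistry", "biology"].foldl
      (fun sel key =>
        let aliases := pvMockAliases.getD key PySem.Set.empty
        if PySem.Set.inter lowered aliases ≠ [] then sel ++ [key] else sel) []
    if selected = [] then ["maths", "physics", "chemistry", "biology"] else selected

-- ===== PORT B =====
def pvDefaultSubjects : List String := ["maths", "physics", "chemistry", "biology"]

-- _ALIAS_TO_KEY: the alias keys are all distinct, so lookups do not depend on the hash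
-- iteration order of the alias sets; one insertion order is fixed here.
def pvAliasToKey : PySem.Dict String String :=
  PySem.Dict.mk
    [("maths", "maths"), ("mathematics", "maths"), ("math", "maths"),
     ("physics", "physics"), ("chemistry", "chemistry"), ("biology", "biology")]

-- the body of B's for-loop over batch_subjects
def pvStep (m : PySem.Set String) (s : String) : PySem.Set String :=
  let norm := PySem.Str.lower (PySem.Str.strip s)
  if norm = "" then m
  else
    match pvAliasToKey.get? norm with
    | some key => PySem.Set.add m key
    | none => m

def get_batch_mock_subjects_alt (batch_subjects : List String) : List String :=
  let matched : PySem.Set String := batch_subjects.foldl pvStep PySem.Set.empty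
  let result := pvDefaultSubjects.filter (fun k => PySem.Set.contains matched k)
  if result = [] then pvDefaultSubjects else result

-- ===== PRECONDITION & SPEC =====
def Spec_get_batch_mock_subjects (batch_subjects : List String) (out : List String) : Prop := out = get_batch_mock_subjects_alt batch_subjects
instance (batch_subjects : List String) (out : List String) : Decidable (Spec_get_batch_mock_subjects batch_subjects out) := by unfold Spec_get_batch_mock_subjects; infer_instance

-- ===== CLAIM (what is proved, stated in full; the proofs are below) =====
def Claim_equal_get_batch_mock_subjects : Prop := ∀ (batch_subjects : List String), Dom_get_batch_mock_subjects batch_subjects → Spec_get_batch_mock_subjects batch_subjects (get_batch_mock_subjects batch_subjects)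

-- ===== LEMMAS AND PROOFS =====

-- str.lower() preserves emptiness
theorem pv_lower_eq_empty_iff (t : String) : PySem.Str.lower t = "" ↔ t = "" := by
  constructor
  · intro h
    have h2 : (PySem.Str.lower t).toList = [] := by rw [h]; rfl
    rw [PySem.Str.toList_lower] at h2
    have ht : t.toList = [] := by
      cases ht : t.toList with
      | nil => rfl
      | cons c cs => rw [ht] at h2; simp [PySem.Chars.lower] at h2
    cases t; simp_all
  · intro h; subst h; rfl

-- full characterisation of the inverted dict's lookup
theorem pv_get_alias (x : String) : pvAliasToKey.get? x =
    (if x = "maths" then some "maths" else if x = "mathematics" then some "maths"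
     else if x = "math" then some "maths" else if x = "physics" then some "physics"
     else if x = "chemistry" then some "chemistry" else if x = "biology" then some "biology"
     else none) := by
  simp only [pvAliasToKey, PySem.Dict.get?_mk_cons, beq_iff_eq]
  have hnil : (PySem.Dict.mk ([] : List (String × String))).get? x = none := rfl
  rw [hnil]
  split_ifs <;> first | rfl | (exfalso; simp_all)

-- x ∈ aliases(k) ↔ the inverted dict maps x to k, for each canonical key
theorem pv_alias_iff (k : String) (hk : k ∈ pvDefaultSubjects) (x : String) :
    x ∈ pvMockAliases.getD k PySem.Set.empty ↔ pvAliasToKey.get? x = some k := by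
  rw [pv_get_alias]
  fin_cases hk
  · have h : pvMockAliases.getD "maths" PySem.Set.empty =
        ["maths", "mathematics", "math"] := by rfl
    rw [h]
    constructor
    · intro hx
      simp only [List.mem_cons, List.not_mem_nil, or_false] at hx
      rcases hx with rfl | rfl | rfl <;> simp_all
    · intro h
      split_ifs at h <;> simp_all
  · have h : pvMockAliases.getD "physics" PySem.Set.empty = ["physics"] := by rfl
    rw [h]
    constructor
    · intro hx
      simp only [List.mem_cons, List.not_mem_nil, or_false] at hx
      subst hx; simp_all
    · intro h; split_ifs at h <;> simp_all
  · have h : pvMockAliases.getD "chemistry" PySem.Set.empty = ["chemistry"] := by rfl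
    rw [h]
    constructor
    · intro hx
      simp only [List.mem_cons, List.not_mem_nil, or_false] at hx
      subst hx; simp_all
    · intro h; split_ifs at h <;> simp_all
  · have h : pvMockAliases.getD "biology" PySem.Set.empty = ["biology"] := by rfl
    rw [h]
    constructor
    · intro hx
      simp only [List.mem_cons, List.not_mem_nil, or_false] at hx
      subst hx; simp_all
    · intro h; split_ifs at h <;> simp_all

-- membership after one step of B's loop
theorem pv_step_mem (m : PySem.Set String) (s k : String) :
    k ∈ pvStep m s ↔ k ∈ m ∨ (PySem.Str.lower (PySem.Str.strip s) ≠ "" ∧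
      pvAliasToKey.get? (PySem.Str.lower (PySem.Str.strip s)) = some k) := by
  unfold pvStep
  by_cases hz : PySem.Str.lower (PySem.Str.strip s) = ""
  · simp [hz]
  · cases hg : pvAliasToKey.get? (PySem.Str.lower (PySem.Str.strip s)) with
    | none => simp [hz, hg]
    | some key => simp [hz, hg, PySem.Set.mem_add, eq_comm]

-- membership in B's matched set
theorem pv_matched_mem (bs : List String) (m : PySem.Set String) (k : String) :
    k ∈ bs.foldl pvStep m ↔
    k ∈ m ∨ ∃ s ∈ bs, PySem.Str.lower (PySem.Str.strip s) ≠ "" ∧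
      pvAliasToKey.get? (PySem.Str.lower (PySem.Str.strip s)) = some k := by
  induction bs generalizing m with
  | nil => simp
  | cons s bs ih =>
    simp only [List.foldl_cons, ih, pv_step_mem, List.mem_cons]
    constructor
    · rintro ((hm | h) | ⟨t, ht, h⟩)
      · exact Or.inl hm
      · exact Or.inr ⟨s, Or.inl rfl, h⟩
      · exact Or.inr ⟨t, Or.inr ht, h⟩
    · rintro (hm | ⟨t, rfl | ht, h⟩)
      · exact Or.inl (Or.inl hm)
      · exact Or.inl (Or.inr h)
      · exact Or.inr ⟨t, ht, h⟩

-- A's per-key intersection test equals B's membership test in matched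
theorem pv_cond_eq (bs : List String) (k : String) (hk : k ∈ pvDefaultSubjects) :
    (PySem.Set.inter
      (PySem.Set.ofList
        ((bs.filter (fun s => decide (PySem.Str.strip s ≠ ""))).map
          (fun s => PySem.Str.lower (PySem.Str.strip s))))
      (pvMockAliases.getD k PySem.Set.empty) ≠ []) ↔
    k ∈ bs.foldl pvStep PySem.Set.empty := by
  rw [pv_matched_mem]
  constructor
  · intro h
    rcases List.exists_mem_of_ne_nil _ h with ⟨x, hx⟩
    rw [PySem.Set.mem_inter] at hx
    obtain ⟨hx1, hx2⟩ := hx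
    rw [PySem.Set.mem_ofList, List.mem_map] at hx1
    obtain ⟨s, hs, rfl⟩ := hx1
    rw [List.mem_filter] at hs
    refine Or.inr ⟨s, hs.1, ?_, (pv_alias_iff k hk _).mp hx2⟩
    rw [Ne, pv_lower_eq_empty_iff]
    simpa using hs.2
  · rintro (h | ⟨s, hs, hz, hg⟩)
    · simp [PySem.Set.empty] at h
    · apply List.ne_nil_of_mem (a := PySem.Str.lower (PySem.Str.strip s))
      rw [PySem.Set.mem_inter]
      constructor
      · rw [PySem.Set.mem_ofList, List.mem_map]
        refine ⟨s, ?_, rfl⟩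
        rw [List.mem_filter]
        refine ⟨hs, ?_⟩
        simp only [decide_eq_true_eq]
        intro hstrip
        exact hz ((pv_lower_eq_empty_iff _).mpr hstrip)
      · exact (pv_alias_iff k hk _).mpr hg

-- ===== VERDICT (by name: the statement is the Claim_ definition above) =====
theorem get_batch_mock_subjects_spec : Claim_equal_get_batch_mock_subjects := by
  intro bs _
  unfold Spec_get_batch_mock_subjects get_batch_mock_subjects get_batch_mock_subjects_alt
  cases bs with
  | nil => rfl
  | cons b bs' =>
    simp only [reduceCtorEq, if_false]
    rw [PySem.List.foldl_append_ite_eq_filter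
      (p := fun key => PySem.Set.inter
        (PySem.Set.ofList
          (((b :: bs').filter (fun s => decide (PySem.Str.strip s ≠ ""))).map
            (fun s => PySem.Str.lower (PySem.Str.strip s))))
        (pvMockAliases.getD key PySem.Set.empty) ≠ [])]
    rw [List.nil_append]
    have hfe : ∀ k ∈ ["maths", "physics", "chemistry", "biology"],
        (decide (PySem.Set.inter
          (PySem.Set.ofList
            (((b :: bs').filter (fun s => decide (PySem.Str.strip s ≠ ""))).map
              (fun s => PySem.Str.lower (PySem.Str.strip s))))
          (pvMockAliases.getD k PySem.Set.empty) ≠ [])) =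
        PySem.Set.contains ((b :: bs').foldl pvStep PySem.Set.empty) k := by
      intro k hk
      rw [Bool.eq_iff_iff, decide_eq_true_eq, PySem.Set.contains_iff]
      exact pv_cond_eq (b :: bs') k hk
    rw [List.filter_congr hfe]
    rfl
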